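-- pv_equiv track=rewrite | github.com/Takenori-Kusaka/discord-bot-google-calendar | scripts/generate_anniversaries.py | generate_date_range
-- ===== SOURCE A (Python) =====
-- DAYS_IN_MONTH = {
--     1: 31,
--     2: 29,
--     3: 31,
--     4: 30,
--     5: 31,
--     6: 30,
--     7: 31,
--     8: 31,
--     9: 30,
--     10: 31,
--     11: 30,
--     12: 31,
-- }
--
-- def generate_date_range(
--     start: tuple[int, int] | None, end: tuple[int, int] | None
-- ) -> list[tuple[int, int]]:
--     """日付範囲を生成"""
--     dates = []
--     for month in range(1, 13):
--         for day in range(1, DAYS_IN_MONTH[month] + 1):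
--             if start and (month, day) < start:
--                 continue
--             if end and (month, day) > end:
--                 continue
--             dates.append((month, day))
--     return dates
-- ===== SOURCE B (Python) =====
-- # B: precomputed sorted table of all (month, day) pairs + binary search for the
-- # two cut points, then one slice — instead of scanning all 366 days per call.
-- DAYS_IN_MONTH = {
--     1: 31,
--     2: 29,
--     3: 31,
--     4: 30,
--     5: 31,
--     6: 30,
--     7: 31,
--     8: 31,
--     9: 30,
--     10: 31,
--     11: 30,
--     12: 31,
-- }
--
-- ALL_DATES = [
--     (month, day)
--     for month in range(1, 13)
--     for day in range(1, DAYS_IN_MONTH[month] + 1)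
-- ]
--
--
-- def _bisect(arr, pred):
--     """First index i with not pred(arr[i]), for an arr whose pred-true part is a prefix."""
--     lo, hi = 0, len(arr)
--     while lo < hi:
--         mid = (lo + hi) // 2
--         if pred(arr[mid]):
--             lo = mid + 1
--         else:
--             hi = mid
--     return lo
--
--
-- def generate_date_range(
--     start: "tuple[int, int] | None", end: "tuple[int, int] | None"
-- ) -> "list[tuple[int, int]]":
--     """日付範囲を生成"""
--     lo = _bisect(ALL_DATES, lambda d: d < start) if start else 0
--     hi = _bisect(ALL_DATES, lambda d: d <= end) if end else len(ALL_DATES)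
--     return ALL_DATES[lo:hi]
-- ===== Notes on version B (the rewrite author's own statement) =====
-- stated objective: alternative
-- what changed: Replaces the per-call scan of all 366 (month, day) pairs with a precomputed sorted table, two hand-rolled binary searches for the cut points, and a single slice of the table.
import Mathlib
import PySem

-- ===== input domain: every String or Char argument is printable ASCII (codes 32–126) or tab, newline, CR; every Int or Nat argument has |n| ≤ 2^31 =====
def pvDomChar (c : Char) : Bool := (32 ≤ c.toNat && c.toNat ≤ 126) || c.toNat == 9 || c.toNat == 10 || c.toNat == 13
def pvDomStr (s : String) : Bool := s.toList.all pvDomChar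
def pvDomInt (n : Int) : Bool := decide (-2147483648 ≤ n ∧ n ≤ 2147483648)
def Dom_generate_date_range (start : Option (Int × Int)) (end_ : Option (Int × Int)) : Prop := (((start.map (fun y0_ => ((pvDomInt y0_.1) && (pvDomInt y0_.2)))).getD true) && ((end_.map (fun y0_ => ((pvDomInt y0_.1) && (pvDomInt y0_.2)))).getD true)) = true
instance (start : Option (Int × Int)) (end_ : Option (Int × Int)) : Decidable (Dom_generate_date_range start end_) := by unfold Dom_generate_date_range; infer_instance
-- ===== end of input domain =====

-- B replaces A's scan of all 366 (month, day) pairs by a precomputed sorted table,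
-- two binary searches for the cut points and one slice (objective: faster per call).


-- ===== PORT A =====
-- shared module-level constant DAYS_IN_MONTH (a dict literal)
def daysInMonth : PySem.Dict Int Int :=
  PySem.Dict.ofList [(1, 31), (2, 29), (3, 31), (4, 30), (5, 31), (6, 30), (7, 31), (8, 31), (9, 30), (10, 31), (11, 30), (12, 31)]

-- Python's '<' on two int 2-tuples is lexicographic; PySem has no pair primitive, so it is
-- ported by hand here (exact for int pairs).
def lexLt (a b : Int × Int) : Bool := a.1 < b.1 || (a.1 == b.1 && a.2 < b.2)

-- Python's '<=' on two int 2-tuples (exact for int pairs: a <= b iff a < b or a == b).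
def lexLe (a b : Int × Int) : Bool := lexLt a b || (a.1 == b.1 && a.2 == b.2)

-- DAYS_IN_MONTH[month]: the key is always present (month ∈ range(1,13)), so the getD
-- default 0 is never used and the lookup is exact (no KeyError reachable).
def generate_date_range (start : Option (Int × Int)) (end_ : Option (Int × Int)) : List (Int × Int) :=
  (PySem.List.pyRange 1 13 1).foldl (fun dates month =>
    (PySem.List.pyRange 1 (PySem.Dict.getD daysInMonth month 0 + 1) 1).foldl (fun dates day =>
      if (match start with | some s => lexLt (month, day) s | none => false) then dates
      else if (match end_ with | some e => lexLt e (month, day) | none => false) then dates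
      else dates ++ [(month, day)]) dates) []

-- ===== PORT B =====
-- ALL_DATES: the module-level comprehension of Source B
def allDates : List (Int × Int) :=
  (PySem.List.pyRange 1 13 1).flatMap (fun month =>
    (PySem.List.pyRange 1 (PySem.Dict.getD daysInMonth month 0 + 1) 1).map (fun day => (month, day)))

-- _bisect's while-loop: hand-written binary search in Source B, ported as well-founded
-- recursion on hi - lo; arr[mid] is in range whenever 0 ≤ lo ≤ mid < hi ≤ len arr,
-- so the getD default (0, 0) is never used on Source B's calls.
def pvMid (lo hi : Nat) : Nat := (lo + hi) / 2  -- mid = (lo + hi) // 2 (both nonnegative, so Nat division is exact)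

def pvBisectLoop (arr : List (Int × Int)) (pred : Int × Int → Bool) (lo hi : Nat) : Nat :=
  if h : lo < hi then
    if pred (arr.getD (pvMid lo hi) (0, 0)) then pvBisectLoop arr pred (pvMid lo hi + 1) hi
    else pvBisectLoop arr pred lo (pvMid lo hi)
  else lo
termination_by hi - lo
decreasing_by all_goals simp [pvMid] at *; omega

def pvBisect (arr : List (Int × Int)) (pred : Int × Int → Bool) : Nat :=
  pvBisectLoop arr pred 0 arr.length

def generate_date_range_alt (start : Option (Int × Int)) (end_ : Option (Int × Int)) : List (Int × Int) :=
  let lo : Nat := match start with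
    | some s => pvBisect allDates (fun d => lexLt d s)
    | none => 0
  let hi : Nat := match end_ with
    | some e => pvBisect allDates (fun d => lexLe d e)
    | none => allDates.length
  PySem.List.slice allDates (some (lo : Int)) (some (hi : Int))

-- ===== PRECONDITION & SPEC =====
def Spec_generate_date_range (start : Option (Int × Int)) (end_ : Option (Int × Int)) (out : List (Int × Int)) : Prop := out = generate_date_range_alt start end_
instance (start : Option (Int × Int)) (end_ : Option (Int × Int)) (out : List (Int × Int)) : Decidable (Spec_generate_date_range start end_ out) := by unfold Spec_generate_date_range; infer_instance

-- ===== CLAIM (what is proved, stated in full; the proofs are below) =====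
def Claim_equal_generate_date_range : Prop := ∀ (start : Option (Int × Int)) (end_ : Option (Int × Int)), Dom_generate_date_range start end_ → Spec_generate_date_range start end_ (generate_date_range start end_)

-- ===== LEMMAS AND PROOFS =====

-- A's two 'continue' tests, fused into the single keep-test of the appended element.
def keepF (start end_ : Option (Int × Int)) (p : Int × Int) : Bool :=
  !(match start with | some s => lexLt p s | none => false) &&
  !(match end_ with | some e => lexLt e p | none => false)

theorem lexLt_trans {a b c : Int × Int} (h1 : lexLt a b = true) (h2 : lexLt b c = true) :
    lexLt a c = true := by
  simp only [lexLt, Bool.or_eq_true, Bool.and_eq_true, decide_eq_true_eq, beq_iff_eq] at *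
  omega

theorem lexLe_of_lt_of_le {a b c : Int × Int} (h1 : lexLt a b = true) (h2 : lexLe b c = true) :
    lexLe a c = true := by
  simp only [lexLt, lexLe, Bool.or_eq_true, Bool.and_eq_true, decide_eq_true_eq, beq_iff_eq] at *
  omega

-- the precomputed table is strictly sorted for lexLt
set_option maxRecDepth 4000 in
theorem allDates_chain : List.IsChain (fun a b => lexLt a b = true) allDates := by decide

theorem allDates_sorted : allDates.Pairwise (fun a b => lexLt a b = true) :=
  @List.IsChain.pairwise _ _ _ ⟨fun h1 h2 => lexLt_trans h1 h2⟩ allDates_chain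

-- binary-search loop invariant: if everything below lo satisfies pred, everything at/above hi
-- fails pred, and pred-true positions are downward closed, the loop returns the cut point r
-- with pred arr[i] ↔ i < r.
theorem pvBisectLoop_spec (arr : List (Int × Int)) (pred : Int × Int → Bool) (lo hi : Nat)
    (hhi : hi ≤ arr.length) (hlohi : lo ≤ hi)
    (hmono : ∀ i j, (hij : i ≤ j) → (hj : j < arr.length) → pred (arr[j]) = true →
      pred (arr[i]'(by omega)) = true)
    (hlow : ∀ i, i < lo → (h : i < arr.length) → pred arr[i] = true)
    (hhigh : ∀ i, hi ≤ i → (h : i < arr.length) → pred arr[i] = false) :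
    lo ≤ pvBisectLoop arr pred lo hi ∧ pvBisectLoop arr pred lo hi ≤ hi ∧
      (∀ i, (h : i < arr.length) → (pred arr[i] = true ↔ i < pvBisectLoop arr pred lo hi)) := by
  rw [pvBisectLoop]
  split
  · next h =>
    have hmideq : pvMid lo hi = (lo + hi) / 2 := rfl
    have hmidlt : pvMid lo hi < arr.length := by rw [hmideq]; omega
    split
    · next hp =>
      have hmid : arr.getD (pvMid lo hi) (0, 0) = arr[pvMid lo hi] := by
        exact List.getD_eq_getElem arr (0, 0) hmidlt
      rw [hmid] at hp
      have ih := pvBisectLoop_spec arr pred (pvMid lo hi + 1) hi hhi (by rw [hmideq] at *; omega) hmono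
        (fun i hi' h' => hmono i (pvMid lo hi) (by omega) hmidlt hp)
        hhigh
      exact ⟨by omega, ih.2.1, ih.2.2⟩
    · next hp =>
      have hmid : arr.getD (pvMid lo hi) (0, 0) = arr[pvMid lo hi] := by
        exact List.getD_eq_getElem arr (0, 0) hmidlt
      rw [hmid] at hp
      have ih := pvBisectLoop_spec arr pred lo (pvMid lo hi) (by rw [hmideq] at *; omega) (by rw [hmideq] at *; omega) hmono hlow
        (fun i hi' h' => by
          by_contra hne
          have : pred arr[i] = true := by
            cases hpv : pred arr[i] with
            | false => exact absurd hpv hne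
            | true => rfl
          have := hmono (pvMid lo hi) i hi' h' this
          simp [this] at hp)
      exact ⟨ih.1, by omega, ih.2.2⟩
  · next h =>
    refine ⟨le_refl _, by omega, fun i hlen => ?_⟩
    constructor
    · intro hp
      by_contra hge
      have := hhigh i (by omega) hlen
      rw [hp] at this; exact absurd this (by simp)
    · intro hilt
      exact hlow i hilt hlen
termination_by hi - lo
decreasing_by all_goals omega

theorem pvBisect_spec (arr : List (Int × Int)) (pred : Int × Int → Bool)
    (hmono : ∀ i j, (hij : i ≤ j) → (hj : j < arr.length) → pred (arr[j]) = true →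
      pred (arr[i]'(by omega)) = true) :
    pvBisect arr pred ≤ arr.length ∧
      (∀ i, (h : i < arr.length) → (pred arr[i] = true ↔ i < pvBisect arr pred)) := by
  have := pvBisectLoop_spec arr pred 0 arr.length (le_refl _) (Nat.zero_le _) hmono
    (fun i hi h => by omega) (fun i hi h => by omega)
  exact ⟨this.2.1, this.2.2⟩

-- filter by an index-interval predicate is a slice
theorem filter_eq_drop_take (L : List (Int × Int)) (f : Int × Int → Bool) (lo hi : Nat)
    (hchar : ∀ i, (h : i < L.length) → (f L[i] = true ↔ (lo ≤ i ∧ i < hi))) :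
    L.filter f = (L.drop lo).take (hi - lo) := by
  have hsplit : L = L.take lo ++ ((L.drop lo).take (hi - lo) ++ (L.drop lo).drop (hi - lo)) := by
    rw [List.take_append_drop, List.take_append_drop]
  have h1 : (L.take lo).filter f = [] := by
    rw [List.filter_eq_nil_iff]
    intro x hx
    obtain ⟨i, hilen, hieq⟩ := List.mem_iff_getElem.mp hx
    simp only [List.length_take] at hilen
    have hlt : i < L.length := by omega
    have hx' : x = L[i] := by rw [← hieq, List.getElem_take]
    rw [hx', hchar i hlt]
    omega
  have h2 : ((L.drop lo).take (hi - lo)).filter f = (L.drop lo).take (hi - lo) := by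
    rw [List.filter_eq_self]
    intro x hx
    obtain ⟨i, hilen, hieq⟩ := List.mem_iff_getElem.mp hx
    simp only [List.length_take, List.length_drop] at hilen
    have hlt : lo + i < L.length := by omega
    have hx' : x = L[lo + i] := by rw [← hieq, List.getElem_take, List.getElem_drop]
    rw [hx', hchar (lo + i) hlt]
    omega
  have h3 : ((L.drop lo).drop (hi - lo)).filter f = [] := by
    rw [List.filter_eq_nil_iff]
    intro x hx
    rw [List.drop_drop] at hx
    obtain ⟨i, hilen, hieq⟩ := List.mem_iff_getElem.mp hx
    simp only [List.length_drop] at hilen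
    have hlt : lo + (hi - lo) + i < L.length := by omega
    have hx' : x = L[lo + (hi - lo) + i] := by rw [← hieq, List.getElem_drop]
    rw [hx', hchar _ hlt]
    omega
  calc L.filter f = (L.take lo ++ ((L.drop lo).take (hi - lo) ++ (L.drop lo).drop (hi - lo))).filter f := by rw [← hsplit]
    _ = (L.drop lo).take (hi - lo) := by
        rw [List.filter_append, List.filter_append, h1, h2, h3]
        simp

-- A's nested loops compute the keep-filter of the precomputed table
theorem portA_eq_filter (start end_ : Option (Int × Int)) :
    generate_date_range start end_ = allDates.filter (keepF start end_) := by
  unfold generate_date_range allDates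
  have hstep : ∀ (month : Int) (dates : List (Int × Int)),
      (PySem.List.pyRange 1 (PySem.Dict.getD daysInMonth month 0 + 1) 1).foldl (fun dates day =>
        if (match start with | some s => lexLt (month, day) s | none => false) then dates
        else if (match end_ with | some e => lexLt e (month, day) | none => false) then dates
        else dates ++ [(month, day)]) dates
      = dates ++ ((PySem.List.pyRange 1 (PySem.Dict.getD daysInMonth month 0 + 1) 1).map
          (fun day => (month, day))).filter (keepF start end_) := by
    intro month dates
    have hfun : (fun (dates : List (Int × Int)) (day : Int) =>
        if (match start with | some s => lexLt (month, day) s | none => false) then dates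
        else if (match end_ with | some e => lexLt e (month, day) | none => false) then dates
        else dates ++ [(month, day)])
        = fun dates day => if keepF start end_ (month, day) then dates ++ [(month, day)] else dates := by
      funext dates day
      cases start with
      | none =>
        cases end_ with
        | none => simp [keepF]
        | some e =>
          simp only [keepF]
          by_cases he : lexLt e (month, day) <;> simp [he]
      | some s =>
        cases end_ with
        | none =>
          simp only [keepF]
          by_cases hs : lexLt (month, day) s <;> simp [hs]
        | some e =>
          simp only [keepF]
          by_cases hs : lexLt (month, day) s <;> by_cases he : lexLt e (month, day) <;>
            simp [hs, he]
    rw [hfun, PySem.List.foldl_append_if (p := fun day => keepF start end_ (month, day))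
      (f := fun day => ((month, day) : Int × Int)), List.filter_map]
    rfl
  have := PySem.List.foldl_congr_mem
    (f := fun (dates : List (Int × Int)) (month : Int) =>
      (PySem.List.pyRange 1 (PySem.Dict.getD daysInMonth month 0 + 1) 1).foldl (fun dates day =>
        if (match start with | some s => lexLt (month, day) s | none => false) then dates
        else if (match end_ with | some e => lexLt e (month, day) | none => false) then dates
        else dates ++ [(month, day)]) dates)
    (g := fun (dates : List (Int × Int)) (month : Int) =>
      dates ++ ((PySem.List.pyRange 1 (PySem.Dict.getD daysInMonth month 0 + 1) 1).map
        (fun day => (month, day))).filter (keepF start end_))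
    (l := PySem.List.pyRange 1 13 1) (init := ([] : List (Int × Int)))
    (fun acc x _ => hstep x acc)
  rw [this, PySem.List.foldl_append_eq_flatMap, List.filter_flatMap]
  rfl

-- B's slice bounds characterise exactly A's keep-test, elementwise on the table
theorem generate_date_range_eq_alt (start end_ : Option (Int × Int)) :
    generate_date_range start end_ = generate_date_range_alt start end_ := by
  rw [portA_eq_filter]
  unfold generate_date_range_alt
  have hsort : ∀ i j, (hij : i < j) → (hj : j < allDates.length) →
      lexLt (allDates[i]'(by omega)) allDates[j] = true := by
    intro i j hij hj
    exact (List.pairwise_iff_getElem.mp allDates_sorted) i j (by omega) hj hij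
  -- the lower cut point
  have hlo : (match start with
        | some s => pvBisect allDates (fun d => lexLt d s)
        | none => 0) ≤ allDates.length ∧
      ∀ i, (h : i < allDates.length) →
        (((match start with | some s => lexLt allDates[i] s | none => false) = false) ↔
          (match start with
            | some s => pvBisect allDates (fun d => lexLt d s)
            | none => 0) ≤ i) := by
    cases start with
    | none => exact ⟨Nat.zero_le _, fun i h => by simp⟩
    | some s =>
      have hmono : ∀ i j, (hij : i ≤ j) → (hj : j < allDates.length) →
          (fun d => lexLt d s) (allDates[j]) = true →
          (fun d => lexLt d s) (allDates[i]'(by omega)) = true := by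
        intro i j hij hj hp
        rcases Nat.lt_or_ge i j with hlt | hge
        · exact lexLt_trans (hsort i j hlt hj) hp
        · have : i = j := by omega
          subst this; exact hp
      have hspec := pvBisect_spec allDates (fun d => lexLt d s) hmono
      refine ⟨hspec.1, fun i h => ?_⟩
      have hiff := hspec.2 i h
      show lexLt allDates[i] s = false ↔ pvBisect allDates (fun d => lexLt d s) ≤ i
      constructor
      · intro hf
        by_contra hc
        have : lexLt allDates[i] s = true := hiff.mpr (by omega)
        rw [hf] at this; exact absurd this (by simp)
      · intro hge
        cases hv : lexLt allDates[i] s with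
        | false => rfl
        | true => have := hiff.mp hv; omega
  -- the upper cut point
  have hhi : (match end_ with
        | some e => pvBisect allDates (fun d => lexLe d e)
        | none => allDates.length) ≤ allDates.length ∧
      ∀ i, (h : i < allDates.length) →
        (((match end_ with | some e => lexLt e allDates[i] | none => false) = false) ↔
          i < (match end_ with
            | some e => pvBisect allDates (fun d => lexLe d e)
            | none => allDates.length)) := by
    cases end_ with
    | none => exact ⟨le_refl _, fun i h => by simpa using h⟩
    | some e =>
      have hmono : ∀ i j, (hij : i ≤ j) → (hj : j < allDates.length) →
          (fun d => lexLe d e) (allDates[j]) = true →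
          (fun d => lexLe d e) (allDates[i]'(by omega)) = true := by
        intro i j hij hj hp
        rcases Nat.lt_or_ge i j with hlt | hge
        · exact lexLe_of_lt_of_le (hsort i j hlt hj) hp
        · have : i = j := by omega
          subst this; exact hp
      have hspec := pvBisect_spec allDates (fun d => lexLe d e) hmono
      refine ⟨hspec.1, fun i h => ?_⟩
      have hiff := hspec.2 i h
      show lexLt e allDates[i] = false ↔ i < pvBisect allDates (fun d => lexLe d e)
      have hnotiff : lexLt e allDates[i] = false ↔ lexLe allDates[i] e = true := by
        simp only [lexLt, lexLe, Bool.or_eq_true, Bool.and_eq_true, decide_eq_true_eq,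
          beq_iff_eq, Bool.or_eq_false_iff, Bool.and_eq_false_iff, decide_eq_false_iff_not,
          beq_eq_false_iff_ne, ne_eq]
        constructor
        · intro hc; omega
        · intro hc; omega
      rw [hnotiff, hiff]
  simp only []
  rw [PySem.List.slice_natCast]
  apply filter_eq_drop_take
  intro i h
  simp only [keepF, Bool.and_eq_true, Bool.not_eq_true']
  rw [hlo.2 i h, hhi.2 i h]

-- ===== VERDICT (by name: the statement is the Claim_ definition above) =====
theorem generate_date_range_spec : Claim_equal_generate_date_range := by
  intro start end_ _
  unfold Spec_generate_date_range
  exact generate_date_range_eq_alt start end_
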